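-- pv_equiv track=rewrite | github.com/Himanshu24091/Cropio | routes/document/markdown_html_converter_routes.py | _clean_markdown_output
-- ===== SOURCE A (Python) =====
-- def _clean_markdown_output(markdown_content: str) -> str:
--     """Clean up the markdown output"""
--     lines = markdown_content.split('\n')
--     cleaned_lines = []
--
--     for line in lines:
--         # Remove excessive blank lines
--         if line.strip() == '' and len(cleaned_lines) > 0 and cleaned_lines[-1].strip() == '':
--             continue
--         cleaned_lines.append(line)
--
--     # Remove trailing whitespace and normalize line endings
--     return '\n'.join(line.rstrip() for line in cleaned_lines).strip()
-- ===== SOURCE B (Python) =====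
-- def _clean_markdown_output(markdown_content: str) -> str:
--     """Clean up the markdown output (run-counting single pass)."""
--     parts = []
--     blanks = 0
--     for line in markdown_content.split('\n'):
--         line = line.rstrip()
--         if line == '':
--             blanks += 1
--         else:
--             if parts:
--                 parts.append('\n\n' if blanks > 0 else '\n')
--             parts.append(line)
--             blanks = 0
--     return ''.join(parts).lstrip()
-- ===== Notes on version B (the rewrite author's own statement) =====
-- stated objective: alternative
-- what changed: A filters the split lines by looking back at the last kept line and then joins, rstrips and strips in a second pass; B is a single run-counting pass that rstrips each line once and emits each nonblank line with a precomputed single or double newline separator, needing only a final lstrip.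
import Mathlib
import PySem

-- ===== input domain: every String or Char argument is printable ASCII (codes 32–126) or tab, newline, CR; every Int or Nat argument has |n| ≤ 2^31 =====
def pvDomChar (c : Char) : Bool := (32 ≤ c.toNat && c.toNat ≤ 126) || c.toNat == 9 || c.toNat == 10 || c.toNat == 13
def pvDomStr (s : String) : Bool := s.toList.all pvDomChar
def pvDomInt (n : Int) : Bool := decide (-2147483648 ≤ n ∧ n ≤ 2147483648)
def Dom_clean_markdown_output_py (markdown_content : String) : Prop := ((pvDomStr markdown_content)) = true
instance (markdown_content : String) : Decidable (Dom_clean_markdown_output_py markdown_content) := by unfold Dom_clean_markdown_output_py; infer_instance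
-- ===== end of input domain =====

-- B replaces A's look-back-at-last-kept-line filtering loop by a single run-counting pass that
-- emits each nonblank line with a precomputed separator (objective: alternative/idiomatic, same cost).

-- ===== PORT A =====
-- string ops ported on the code-point lists via PySem.Chars (exact; the separator '\n' is nonempty)
def clean_markdown_output_py (markdown_content : String) : String :=
  let lines := PySem.Chars.splitOn markdown_content.toList ['\n']
  let cleaned_lines := lines.foldl
    (fun acc line =>
      if PySem.Chars.strip line == ([] : List Char)
          && decide (0 < acc.length)
          && ((PySem.List.pyGet? acc (-1)).map
                (fun l => PySem.Chars.strip l == ([] : List Char))).getD false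
      then acc
      else acc ++ [line]) []
  String.ofList (PySem.Chars.strip (PySem.Chars.join ['\n'] (cleaned_lines.map PySem.Chars.rstrip)))

-- ===== PORT B =====
def clean_markdown_output_py_alt (markdown_content : String) : String :=
  let step : List (List Char) × Int → List Char → List (List Char) × Int := fun st line0 =>
    let line := PySem.Chars.rstrip line0
    if line == ([] : List Char) then (st.1, st.2 + 1)
    else (st.1 ++ (if st.1 == ([] : List (List Char)) then []
                   else [if st.2 > 0 then ['\n', '\n'] else ['\n']]) ++ [line], 0)
  let parts := ((PySem.Chars.splitOn markdown_content.toList ['\n']).foldl step ([], 0)).1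
  String.ofList (PySem.Chars.lstrip (PySem.Chars.join [] parts))

-- ===== PRECONDITION & SPEC =====
def Spec_clean_markdown_output_py (markdown_content : String) (out : String) : Prop := out = clean_markdown_output_py_alt markdown_content
instance (markdown_content : String) (out : String) : Decidable (Spec_clean_markdown_output_py markdown_content out) := by unfold Spec_clean_markdown_output_py; infer_instance

-- ===== CLAIM (what is proved, stated in full; the proofs are below) =====
def Claim_equal_clean_markdown_output_py : Prop := ∀ (markdown_content : String), Dom_clean_markdown_output_py markdown_content → Spec_clean_markdown_output_py markdown_content (clean_markdown_output_py markdown_content)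

-- ===== LEMMAS AND PROOFS =====

-- A's kept-line list after rstripping each element, as a recursion on the (rstripped) lines;
-- the flag says whether the last kept line was blank.
def aRun : Bool → List (List Char) → List (List Char)
  | _, [] => []
  | lastBlank, x :: ys =>
      if x = ([] : List Char) then
        (if lastBlank then aRun true ys else [] :: aRun true ys)
      else x :: aRun false ys

-- B's concatenated output, as a recursion on the (rstripped) lines;
-- first flag = "some line already emitted", second = "a blank was seen since".
def bRun : Bool → Bool → List (List Char) → List Char
  | _, _, [] => []
  | started, blank, x :: ys =>
      if x = ([] : List Char) then bRun started true ys
      else (if started then (if blank then ['\n', '\n'] else ['\n']) else []) ++ x ++ bRun true false ys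

-- '\n'-join of a tail of lines, each preceded by one '\n'
def jt (l : List (List Char)) : List Char := (l.map (fun x => '\n' :: x)).flatten

-- the "pending trailing blank" flag tracked through aRun
def eb : Bool → List (List Char) → Bool
  | b, [] => b
  | _, x :: ys => if x = ([] : List Char) then eb true ys else eb false ys

theorem join_newline_cons (x : List Char) (l : List (List Char)) :
    PySem.Chars.join ['\n'] (x :: l) = x ++ jt l := by
  induction l generalizing x with
  | nil => simp [PySem.Chars.join_singleton, jt]
  | cons y l ih => rw [PySem.Chars.join_cons_cons, ih y]; simp [jt]

theorem join_nil_eq_flatten (l : List (List Char)) :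
    PySem.Chars.join [] l = l.flatten := by
  induction l with
  | nil => simp [PySem.Chars.join_nil]
  | cons x l ih =>
    cases l with
    | nil => simp [PySem.Chars.join_singleton]
    | cons y t => rw [PySem.Chars.join_cons_cons, ih]; simp

theorem rstrip_eq_nil_iff (l : List Char) :
    PySem.Chars.rstrip l = [] ↔ ∀ c ∈ l, PySem.Chars.isspace c = true := by
  simp only [PySem.Chars.rstrip, List.reverse_eq_nil_iff, List.dropWhile_eq_nil_iff]
  constructor
  · intro h c hc; exact h c (by simpa using hc)
  · intro h c hc; exact h c (by simpa using hc)

theorem strip_eq_nil_iff (l : List Char) :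
    PySem.Chars.strip l = [] ↔ ∀ c ∈ l, PySem.Chars.isspace c = true := by
  simp only [PySem.Chars.strip, PySem.Chars.lstrip, rstrip_eq_nil_iff]
  constructor
  · intro h c hc
    by_cases hsp : PySem.Chars.isspace c = true
    · exact hsp
    · have hsplit := List.takeWhile_append_dropWhile (p := PySem.Chars.isspace) (l := l)
      rw [← hsplit] at hc
      rcases List.mem_append.mp hc with h1 | h2
      · exact List.mem_takeWhile_imp h1
      · exact h c h2
  · intro h c hc
    exact h c (List.Sublist.mem hc (List.dropWhile_sublist _))

theorem rstrip_idem (l : List Char) :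
    PySem.Chars.rstrip (PySem.Chars.rstrip l) = PySem.Chars.rstrip l := by
  simp [PySem.Chars.rstrip, List.dropWhile_idempotent]

theorem lstrip_cons_ws {c : Char} (h : PySem.Chars.isspace c = true) (t : List Char) :
    PySem.Chars.lstrip (c :: t) = PySem.Chars.lstrip t := by
  simp [PySem.Chars.lstrip, List.dropWhile_cons, h]

theorem lstrip_append_of_ne {x : List Char} (h : PySem.Chars.lstrip x ≠ []) (u : List Char) :
    PySem.Chars.lstrip (x ++ u) = PySem.Chars.lstrip x ++ u := by
  simp only [PySem.Chars.lstrip] at *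
  rw [List.dropWhile_append, if_neg (by simpa [List.isEmpty_iff] using h)]

theorem rstrip_append_ws {c : Char} (h : PySem.Chars.isspace c = true) (u : List Char) :
    PySem.Chars.rstrip (u ++ [c]) = PySem.Chars.rstrip u := by
  simp [PySem.Chars.rstrip, List.dropWhile_cons, h]

theorem dropWhile_cons_self {p : Char → Bool} {c : Char} {t : List Char}
    (h : List.dropWhile p (c :: t) = c :: t) : p c = false := by
  by_cases hpc : p c = true
  · rw [List.dropWhile_cons, if_pos hpc] at h
    have := List.length_dropWhile_le p t
    rw [h] at this; simp at this
  · simpa using hpc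

theorem rev_head_nonws {z : List Char} (hz : PySem.Chars.rstrip z = z) (hne : z ≠ []) :
    ∃ c t, z.reverse = c :: t ∧ PySem.Chars.isspace c = false := by
  cases h : z.reverse with
  | nil => exact absurd (by simpa using h) hne
  | cons c t =>
    refine ⟨c, t, rfl, ?_⟩
    have hd : List.dropWhile PySem.Chars.isspace z.reverse = z.reverse := by
      have := congrArg List.reverse hz
      simpa [PySem.Chars.rstrip] using this
    rw [h] at hd
    exact dropWhile_cons_self hd

theorem rstrip_append_of_rstripped {z : List Char} (hz : PySem.Chars.rstrip z = z)
    (hne : z ≠ []) (a : List Char) :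
    PySem.Chars.rstrip (a ++ z) = a ++ z := by
  obtain ⟨c, t, hrev, hc⟩ := rev_head_nonws hz hne
  have hzval : z = t.reverse ++ [c] := by
    have := congrArg List.reverse hrev; simpa using this
  simp [PySem.Chars.rstrip, hrev, List.dropWhile_cons, hc, hzval]

theorem rstripped_of_append {a z : List Char} (h : PySem.Chars.rstrip (a ++ z) = a ++ z)
    (hne : z ≠ []) : PySem.Chars.rstrip z = z := by
  cases hrev : z.reverse with
  | nil => exact absurd (by simpa using hrev) hne
  | cons c t =>
    have hd : List.dropWhile PySem.Chars.isspace (a ++ z).reverse = (a ++ z).reverse := by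
      have := congrArg List.reverse h
      simpa [PySem.Chars.rstrip] using this
    rw [List.reverse_append, hrev, List.cons_append] at hd
    have hc : PySem.Chars.isspace c = false := dropWhile_cons_self hd
    simp [PySem.Chars.rstrip, hrev, List.dropWhile_cons, hc]
    have := congrArg List.reverse hrev; simpa using this.symm

theorem lstrip_ne_nil {x : List Char} (hx : PySem.Chars.rstrip x = x) (hne : x ≠ []) :
    PySem.Chars.lstrip x ≠ [] := by
  obtain ⟨c, t, hrev, hc⟩ := rev_head_nonws hx hne
  have hmem : c ∈ x := by
    have : c ∈ x.reverse := by rw [hrev]; exact List.mem_cons_self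
    simpa using this
  simp only [PySem.Chars.lstrip, ne_eq, List.dropWhile_eq_nil_iff]
  intro h
  exact absurd (h c hmem) (by simp [hc])

theorem rstrip_lstrip_self {x : List Char} (hx : PySem.Chars.rstrip x = x) (hne : x ≠ []) :
    PySem.Chars.rstrip (PySem.Chars.lstrip x) = PySem.Chars.lstrip x := by
  have hsplit : x = List.takeWhile PySem.Chars.isspace x ++ PySem.Chars.lstrip x := by
    simp [PySem.Chars.lstrip, List.takeWhile_append_dropWhile]
  refine rstripped_of_append (a := List.takeWhile PySem.Chars.isspace x) ?_ (lstrip_ne_nil hx hne)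
  rw [← hsplit]; exact hx

-- core correspondence between A's collapsed join and B's emitted stream
theorem S_lemma (b : Bool) (ys : List (List Char)) :
    (if b then ['\n'] else []) ++ jt (aRun b ys)
      = bRun true b ys ++ (if eb b ys then ['\n'] else []) := by
  induction ys generalizing b with
  | nil => cases b <;> simp [aRun, bRun, eb, jt]
  | cons x ys ih =>
    by_cases hx : x = ([] : List Char)
    · subst hx
      cases b with
      | false =>
        simp only [aRun, bRun, eb, if_pos rfl, Bool.false_eq_true, if_false]
        have := ih true
        simp only [if_pos rfl] at this ⊢
        simpa [jt] using this
      | true =>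
        simp only [aRun, bRun, eb, if_pos rfl]
        simpa using ih true
    · simp only [aRun, bRun, eb, if_neg hx]
      have := ih false
      simp only [Bool.false_eq_true, if_false, List.nil_append] at this
      cases b <;> simp [jt] at this ⊢ <;> rw [this]

theorem bRun_ends (b : Bool) (ys : List (List Char)) :
    bRun true b ys = [] ∨
      ∃ u z, z ≠ ([] : List Char) ∧ z ∈ ys ∧ bRun true b ys = u ++ z := by
  induction ys generalizing b with
  | nil => left; rfl
  | cons x ys ih =>
    by_cases hx : x = ([] : List Char)
    · subst hx
      rcases ih true with h | ⟨u, z, hz, hmem, heq⟩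
      · left; simpa [bRun] using h
      · right; exact ⟨u, z, hz, List.mem_cons_of_mem _ hmem, by simpa [bRun] using heq⟩
    · right
      rcases ih false with h | ⟨u, z, hz, hmem, heq⟩
      · exact ⟨(if b then ['\n','\n'] else ['\n']), x, hx, List.mem_cons_self,
          by simp [bRun, hx, h]⟩
      · exact ⟨(if b then ['\n','\n'] else ['\n']) ++ x ++ u, z, hz,
          List.mem_cons_of_mem _ hmem, by simp [bRun, hx, heq]⟩

-- the nonblank-head case shared by the two phases
theorem core_lemma {x : List Char} (hx : PySem.Chars.rstrip x = x) (hne : x ≠ [])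
    (ys : List (List Char)) (hys : ∀ z ∈ ys, PySem.Chars.rstrip z = z) :
    PySem.Chars.rstrip (PySem.Chars.lstrip (x ++ jt (aRun false ys)))
      = PySem.Chars.lstrip (x ++ bRun true false ys) := by
  have hl := lstrip_ne_nil hx hne
  rw [lstrip_append_of_ne hl, lstrip_append_of_ne hl]
  have hS := S_lemma false ys
  simp only [Bool.false_eq_true, if_false, List.nil_append] at hS
  rw [hS]
  have hend : PySem.Chars.rstrip (PySem.Chars.lstrip x ++ bRun true false ys)
      = PySem.Chars.lstrip x ++ bRun true false ys := by
    rcases bRun_ends false ys with h | ⟨u, z, hz, hmem, heq⟩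
    · rw [h, List.append_nil]; exact rstrip_lstrip_self hx hne
    · rw [heq, ← List.append_assoc]
      exact rstrip_append_of_rstripped (hys z hmem) hz _
  by_cases he : eb false ys = true
  · rw [he, if_pos rfl, ← List.append_assoc, rstrip_append_ws (by decide)]
    exact hend
  · rw [if_neg (by simpa using he), List.append_nil]
    exact hend

theorem T2_lemma (ys : List (List Char)) (hys : ∀ z ∈ ys, PySem.Chars.rstrip z = z) :
    PySem.Chars.rstrip (PySem.Chars.lstrip (jt (aRun true ys)))
      = PySem.Chars.lstrip (bRun false true ys) := by
  induction ys with
  | nil => simp [aRun, bRun, jt, PySem.Chars.lstrip, PySem.Chars.rstrip]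
  | cons x ys ih =>
    by_cases hx : x = ([] : List Char)
    · subst hx
      simp only [aRun, bRun, if_pos rfl, if_true]
      exact ih (fun z hz => hys z (List.mem_cons_of_mem _ hz))
    · simp only [aRun, bRun, if_neg hx, if_true]
      have hxr := hys x List.mem_cons_self
      have hys' : ∀ z ∈ ys, PySem.Chars.rstrip z = z :=
        fun z hz => hys z (List.mem_cons_of_mem _ hz)
      have : jt (x :: aRun false ys) = '\n' :: (x ++ jt (aRun false ys)) := by simp [jt]
      rw [this, lstrip_cons_ws (by decide)]
      simpa using core_lemma hxr hx ys hys'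

theorem T_lemma (ys : List (List Char)) (hys : ∀ z ∈ ys, PySem.Chars.rstrip z = z) :
    PySem.Chars.rstrip (PySem.Chars.lstrip (PySem.Chars.join ['\n'] (aRun false ys)))
      = PySem.Chars.lstrip (bRun false false ys) := by
  cases ys with
  | nil => simp [aRun, bRun, PySem.Chars.join_nil, PySem.Chars.lstrip, PySem.Chars.rstrip]
  | cons x ys =>
    by_cases hx : x = ([] : List Char)
    · subst hx
      have h1 : aRun false ([] :: ys) = [] :: aRun true ys := by simp [aRun]
      have h2 : bRun false false (([] : List Char) :: ys) = bRun false true ys := by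
        simp [bRun]
      rw [h1, h2, join_newline_cons]
      simp only [List.nil_append]
      exact T2_lemma ys (fun z hz => hys z (List.mem_cons_of_mem _ hz))
    · have h1 : aRun false (x :: ys) = x :: aRun false ys := by simp [aRun, hx]
      have h2 : bRun false false (x :: ys) = x ++ bRun true false ys := by
        simp [bRun, hx]
      rw [h1, h2, join_newline_cons]
      exact core_lemma (hys x List.mem_cons_self) hx ys
        (fun z hz => hys z (List.mem_cons_of_mem _ hz))

-- pyGet? at -1 is getLast?
theorem pyGet_neg_one {α : Type} (xs : List α) :
    PySem.List.pyGet? xs (-1) = xs.getLast? := by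
  cases xs with
  | nil => rfl
  | cons a t =>
    simp only [PySem.List.pyGet?, PySem.List.pyIdx?]
    rw [if_neg (by decide), if_pos (by rw [List.length_cons]; push_cast; omega)]
    simp [List.getLast?_eq_getElem?]

-- abbreviations for the two fold bodies
def aStep (acc : List (List Char)) (line : List Char) : List (List Char) :=
  if PySem.Chars.strip line == ([] : List Char)
      && decide (0 < acc.length)
      && ((PySem.List.pyGet? acc (-1)).map
            (fun l => PySem.Chars.strip l == ([] : List Char))).getD false
  then acc
  else acc ++ [line]

def bStep (st : List (List Char) × Int) (line0 : List Char) : List (List Char) × Int :=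
  let line := PySem.Chars.rstrip line0
  if line == ([] : List Char) then (st.1, st.2 + 1)
  else (st.1 ++ (if st.1 == ([] : List (List Char)) then []
                 else [if st.2 > 0 then ['\n', '\n'] else ['\n']]) ++ [line], 0)

theorem blank_iff (l : List Char) :
    (PySem.Chars.strip l = ([] : List Char)) ↔ (PySem.Chars.rstrip l = ([] : List Char)) := by
  rw [strip_eq_nil_iff, rstrip_eq_nil_iff]

theorem foldA_main (ls : List (List Char)) :
    ∀ (acc : List (List Char)) (a0 : List Char) , 
      (List.foldl aStep (acc ++ [a0]) ls).map PySem.Chars.rstrip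
        = (acc ++ [a0]).map PySem.Chars.rstrip
            ++ aRun (decide (PySem.Chars.rstrip a0 = [])) (ls.map PySem.Chars.rstrip) := by
  induction ls with
  | nil => intro acc a0; simp [aRun]
  | cons l ls ih =>
    intro acc a0
    have hlast : PySem.List.pyGet? (acc ++ [a0]) (-1) = some a0 := by
      rw [pyGet_neg_one]; simp
    by_cases hbl : PySem.Chars.rstrip l = ([] : List Char)
    · by_cases hb0 : PySem.Chars.rstrip a0 = ([] : List Char)
      · -- skipped
        have hcond : aStep (acc ++ [a0]) l = acc ++ [a0] := by
          simp only [aStep, hlast]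
          rw [if_pos]
          simp [blank_iff, hbl, hb0]
        simp only [List.foldl_cons, hcond, List.map_cons]
        rw [ih acc a0]
        simp [aRun, hbl, hb0]
      · -- appended blank after nonblank
        have hcond : aStep (acc ++ [a0]) l = (acc ++ [a0]) ++ [l] := by
          simp only [aStep, hlast]
          rw [if_neg]
          simp [blank_iff, hbl, hb0]
        simp only [List.foldl_cons, hcond, List.map_cons]
        rw [ih (acc ++ [a0]) l]
        simp [aRun, hbl, hb0]
    · -- nonblank line: always appended
      have hcond : aStep (acc ++ [a0]) l = (acc ++ [a0]) ++ [l] := by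
        simp only [aStep, hlast]
        rw [if_neg]
        simp [blank_iff, hbl]
      simp only [List.foldl_cons, hcond, List.map_cons]
      rw [ih (acc ++ [a0]) l]
      simp [aRun, hbl]

theorem foldA_start (ls : List (List Char)) :
    (List.foldl aStep [] ls).map PySem.Chars.rstrip
      = aRun false (ls.map PySem.Chars.rstrip) := by
  cases ls with
  | nil => simp [aRun]
  | cons l ls =>
    have h0 : aStep [] l = [l] := by simp [aStep]
    simp only [List.foldl_cons, h0, List.map_cons]
    have := foldA_main ls [] l
    simp only [List.nil_append, List.map_cons, List.map_nil] at this
    rw [this]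
    by_cases hbl : PySem.Chars.rstrip l = ([] : List Char)
    · simp [aRun, hbl]
    · simp [aRun, hbl]

theorem bRun_false_flag (ys : List (List Char)) (b b' : Bool) :
    bRun false b ys = bRun false b' ys := by
  induction ys generalizing b b' with
  | nil => rfl
  | cons x ys ih =>
    by_cases hx : x = ([] : List Char)
    · simp only [bRun, if_pos hx]
    · simp [bRun, hx]

theorem foldB_main (ls : List (List Char)) :
    ∀ (parts : List (List Char)) (b : Int), parts ≠ [] → 0 ≤ b →
      PySem.Chars.join [] ((List.foldl bStep (parts, b) ls).1)
        = PySem.Chars.join [] parts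
            ++ bRun true (decide (0 < b)) (ls.map PySem.Chars.rstrip) := by
  induction ls with
  | nil => intro parts b _ _; simp [bRun]
  | cons l ls ih =>
    intro parts b hp hb
    by_cases hbl : PySem.Chars.rstrip l = ([] : List Char)
    · have hstep : bStep (parts, b) l = (parts, b + 1) := by
        simp [bStep, hbl]
      simp only [List.foldl_cons, hstep, List.map_cons]
      rw [ih parts (b + 1) hp (by omega)]
      simp [bRun, hbl, show (0 : Int) < b + 1 by omega]
    · have hstep : bStep (parts, b) l
          = (parts ++ [if b > 0 then ['\n','\n'] else ['\n']] ++ [PySem.Chars.rstrip l], 0) := by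
        simp [bStep, hbl, hp]
      simp only [List.foldl_cons, hstep, List.map_cons]
      rw [ih _ 0 (by simp) le_rfl]
      simp only [join_nil_eq_flatten, List.flatten_append, List.flatten_cons,
        List.flatten_nil, List.append_nil, bRun, if_neg hbl, if_true]
      by_cases hbpos : (0 : Int) < b
      · simp [hbpos]
      · simp [hbpos]

theorem foldB_empty (ls : List (List Char)) :
    ∀ (b : Int), 0 ≤ b →
      PySem.Chars.join [] ((List.foldl bStep (([] : List (List Char)), b) ls).1)
        = bRun false false (ls.map PySem.Chars.rstrip) := by
  induction ls with
  | nil => intro b _; simp [bRun, PySem.Chars.join_nil]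
  | cons l ls ih =>
    intro b hb
    by_cases hbl : PySem.Chars.rstrip l = ([] : List Char)
    · have hstep : bStep (([] : List (List Char)), b) l = ([], b + 1) := by
        simp [bStep, hbl]
      simp only [List.foldl_cons, hstep, List.map_cons]
      rw [ih (b + 1) (by omega)]
      simp only [bRun, hbl, List.map_cons, if_pos rfl]
      exact bRun_false_flag _ false true
    · have hstep : bStep (([] : List (List Char)), b) l = ([PySem.Chars.rstrip l], 0) := by
        simp [bStep, hbl]
      simp only [List.foldl_cons, hstep, List.map_cons]
      rw [foldB_main ls [PySem.Chars.rstrip l] 0 (by simp) le_rfl]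
      simp [bRun, hbl, PySem.Chars.join_singleton]

-- ===== VERDICT (by name: the statement is the Claim_ definition above) =====
theorem clean_markdown_output_py_spec : Claim_equal_clean_markdown_output_py := by
  intro s _
  unfold Spec_clean_markdown_output_py clean_markdown_output_py clean_markdown_output_py_alt
  apply congrArg String.ofList
  show PySem.Chars.strip (PySem.Chars.join ['\n']
        ((List.foldl aStep [] (PySem.Chars.splitOn s.toList ['\n'])).map PySem.Chars.rstrip))
      = PySem.Chars.lstrip (PySem.Chars.join []
        (List.foldl bStep (([] : List (List Char)), (0 : Int))
          (PySem.Chars.splitOn s.toList ['\n'])).1)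
  rw [foldA_start, foldB_empty _ 0 le_rfl]
  show PySem.Chars.rstrip (PySem.Chars.lstrip _) = _
  exact T_lemma _ (by
    intro z hz
    obtain ⟨w, _, rfl⟩ := List.mem_map.mp hz
    exact rstrip_idem w)
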